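-- pv_equiv track=rewrite | github.com/piotrhelm/NESTFUL | data_v2/executable_functions/py_code_file_3621.py | max_zeros
-- ===== SOURCE A (Python) =====
-- from typing import Union
--
-- def max_zeros(n: Union[int, float]) -> int:
--
--     """Finds the maximal number of consecutive zeros in the binary representation of `n`.
--
--
--
--     Args:
--
--         n: A non-negative integer.
--
--
--
--     Returns:
--
--         The maximal number of consecutive zeros in the binary representation of `n`.
--
--     """
--
--     max_count = 0
--
--     count = 0
--
--
--
--     while n:
--
--         if n & 1 == 0:  # Check if the least significant bit is 0
--
--             count += 1
--
--         else:  # If the least significant bit is 1, reset the count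
--
--             count = 0
--
--
--
--         max_count = max(max_count, count)
--
--         n >>= 1  # Shift right by 1 bit
--
--
--
--     return max_count
-- ===== SOURCE B (Python) =====
-- def max_zeros(n):
--     """Maximal number of consecutive zeros in the binary representation of n."""
--     if n == 0:
--         return 0
--     return max(len(run) for run in bin(n)[2:].split('1'))
-- ===== Notes on version B (the rewrite author's own statement) =====
-- stated objective: idiomatic
-- what changed: Replaces A's LSB-to-MSB bit loop with its running counter and running maximum by building the binary string representation, splitting it on the one-bits and returning the length of the longest zero-run chunk; Pre_ excludes negative n, where A's while-loop never terminates.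
import Mathlib
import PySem

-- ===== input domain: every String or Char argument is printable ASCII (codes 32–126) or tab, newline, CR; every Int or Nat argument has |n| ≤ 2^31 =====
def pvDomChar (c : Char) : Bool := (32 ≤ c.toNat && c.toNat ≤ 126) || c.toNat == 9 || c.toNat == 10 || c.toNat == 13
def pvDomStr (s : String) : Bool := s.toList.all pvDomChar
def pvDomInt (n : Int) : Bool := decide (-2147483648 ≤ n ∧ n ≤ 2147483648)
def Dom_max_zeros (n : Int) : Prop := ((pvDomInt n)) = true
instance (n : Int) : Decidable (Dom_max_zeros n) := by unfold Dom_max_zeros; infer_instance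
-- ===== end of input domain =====

-- B replaces A's LSB bit loop (running counter + running maximum) by splitting the binary
-- string bin(n)[2:] on '1' and taking the longest chunk (idiomatic); equal on Pre_ (0 ≤ n).

-- ===== PORT A =====
-- A's `while n:` loop. On Pre_ (0 ≤ n) the loop variable stays a natural number, so the
-- loop is ported over Nat (for n < 0 Python's loop never terminates; such n are outside Pre_).
def maxZerosLoop (n : Nat) (count maxCount : Int) : Int :=
  if _h : n = 0 then maxCount
  else
    -- if n & 1 == 0: count += 1 else: count = 0
    let count' := if n &&& 1 == 0 then count + 1 else (0 : Int)
    -- max_count = max(max_count, count); n >>= 1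
    maxZerosLoop (n >>> 1) count' (max maxCount count')
termination_by n
decreasing_by simpa [Nat.shiftRight_one] using Nat.div_lt_self (Nat.pos_of_ne_zero ‹n ≠ 0›) one_lt_two

def max_zeros (n : Int) : Int := maxZerosLoop n.toNat 0 0

-- ===== PORT B =====
def max_zeros_alt (n : Int) : Int :=
  if n = 0 then 0
  else
    let cs := (PySem.Int.pyBin n).toList.drop 2              -- bin(n)[2:]  ([2:] = drop 2)
    let parts := PySem.Chars.splitOn cs ['1']                -- .split('1')
    match PySem.List.max? (parts.map PySem.List.len) (fun x => x) with  -- max(len(run) for run in …)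
    | some m => m
    | none => 0  -- unreachable: str.split always returns a nonempty list

-- ===== PRECONDITION & SPEC =====
-- Pre_ excludes n < 0: there Python A's `while n:` never terminates (n >>= 1 stalls at -1),
-- so A returns on exactly the inputs admitted here.
def Pre_max_zeros (n : Int) : Prop := 0 ≤ n
instance (n : Int) : Decidable (Pre_max_zeros n) := by unfold Pre_max_zeros; infer_instance
def pvWitness_max_zeros : Int := (4)

def Spec_max_zeros (n : Int) (out : Int) : Prop := out = max_zeros_alt n
instance (n : Int) (out : Int) : Decidable (Spec_max_zeros n out) := by unfold Spec_max_zeros; infer_instance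

-- ===== CLAIM (what is proved, stated in full; the proofs are below) =====
def Claim_equal_max_zeros : Prop := ∀ (n : Int), Dom_max_zeros n → Pre_max_zeros n → Spec_max_zeros n (max_zeros n)

-- ===== LEMMAS AND PROOFS =====

-- Reference splitter: s.split('1') on char lists, structurally.
def splitOne : List Char → List (List Char)
  | [] => [[]]
  | c :: t =>
    if c = '1' then [] :: splitOne t
    else
      match splitOne t with
      | [] => [[c]]
      | p :: ps => (c :: p) :: ps

theorem splitOne_ne_nil (l : List Char) : splitOne l ≠ [] := by
  cases l with
  | nil => simp [splitOne]
  | cons c t =>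
    simp only [splitOne]
    split_ifs
    · simp
    · cases h : splitOne t <;> simp

theorem splitOn_go_eq (fuel : Nat) : ∀ (l cur : List Char) (acc : List (List Char)),
    l.length < fuel →
    PySem.Chars.splitOn.go ['1'] fuel l cur acc =
      acc.reverse ++ (match splitOne l with
        | [] => []
        | p :: ps => (cur.reverse ++ p) :: ps) := by
  induction fuel with
  | zero => intro l cur acc h; omega
  | succ fuel ih =>
    intro l cur acc h
    cases l with
    | nil => simp [PySem.Chars.splitOn.go, splitOne]
    | cons c rest =>
      rw [PySem.Chars.splitOn.go]
      by_cases hc : c = '1'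
      · subst hc
        have hpre : List.isPrefixOf ['1'] ('1' :: rest) = true := by
          simp [List.isPrefixOf]
        rw [if_pos hpre]
        simp only [List.length_cons, List.length_nil, List.drop_succ_cons, List.drop_zero]
        rw [ih rest [] (cur.reverse :: acc) (by simpa using Nat.lt_of_succ_lt_succ h)]
        cases hs : splitOne rest with
        | nil => exact absurd hs (splitOne_ne_nil rest)
        | cons p ps => simp [splitOne, hs]
      · have hpre : List.isPrefixOf ['1'] (c :: rest) = false := by
          simp [List.isPrefixOf]
          intro h'; exact absurd h'.symm hc
        rw [if_neg (by simp [hpre])]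
        rw [ih rest (c :: cur) acc (by simpa using Nat.lt_of_succ_lt_succ h)]
        cases hs : splitOne rest with
        | nil => exact absurd hs (splitOne_ne_nil rest)
        | cons p ps => simp [splitOne, hc, hs]

theorem splitOn_one (l : List Char) : PySem.Chars.splitOn l ['1'] = splitOne l := by
  show PySem.Chars.splitOn.go ['1'] (l.length + 1) l [] [] = splitOne l
  rw [splitOn_go_eq (l.length + 1) l [] [] (by omega)]
  cases hs : splitOne l with
  | nil => exact absurd hs (splitOne_ne_nil l)
  | cons p ps => simp

-- Reference binary printer: format(n, 'b') for positive n, structurally.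
def myBin (n : Nat) : List Char :=
  if _h : n < 2 then [Nat.digitChar n]
  else myBin (n / 2) ++ [Nat.digitChar (n % 2)]
termination_by n
decreasing_by exact Nat.div_lt_self (by omega) one_lt_two

theorem toDigitsCore_eq (fuel : Nat) : ∀ (n : Nat) (ds : List Char),
    n < fuel → Nat.toDigitsCore 2 fuel n ds = myBin n ++ ds := by
  induction fuel with
  | zero => intro n ds h; omega
  | succ fuel ih =>
    intro n ds h
    rw [Nat.toDigitsCore]
    by_cases h2 : n / 2 = 0
    · simp only [h2, if_pos]
      rw [myBin]
      have : n < 2 := by omega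
      simp [this, Nat.mod_eq_of_lt this]
    · rw [if_neg h2, ih (n / 2) _ (by omega)]
      conv_rhs => rw [myBin.eq_def]
      have : ¬ n < 2 := by omega
      simp [this]

theorem toDigits_eq (n : Nat) : Nat.toDigits 2 n = myBin n := by
  show Nat.toDigitsCore 2 (n + 1) n [] = myBin n
  rw [toDigitsCore_eq (n + 1) n [] (by omega)]; simp

-- mrun l = max zero-run length of l, computed from splitOne (the way B computes it).
def mrun (l : List Char) : Nat := ((splitOne l).map List.length).foldl max 0

theorem foldl_max_init (l : List Nat) : ∀ (a : Nat), l.foldl max a = max a (l.foldl max 0) := by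
  induction l with
  | nil => intro a; simp
  | cons x t ih =>
    intro a
    simp only [List.foldl_cons]
    rw [ih (max a x), ih (max 0 x)]
    omega

theorem mrun_cons_le (c : Char) (t : List Char) : mrun t ≤ mrun (c :: t) := by
  unfold mrun
  simp only [splitOne]
  split_ifs with hc
  · simp
  · cases hs : splitOne t with
    | nil => exact absurd hs (splitOne_ne_nil t)
    | cons p ps =>
      simp only [hs, List.map_cons, List.foldl_cons]
      rw [foldl_max_init, foldl_max_init (ps.map List.length) (max 0 (c :: p).length)]
      simp only [List.length_cons]
      omega

theorem splitOne_append_one (xs ys : List Char) :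
    splitOne (xs ++ '1' :: ys) = splitOne xs ++ splitOne ys := by
  induction xs with
  | nil => simp [splitOne]
  | cons c t ih =>
    by_cases hc : c = '1'
    · subst hc; simp [splitOne, ih]
    · simp only [List.cons_append, splitOne, hc, if_neg, ih]
      cases hs : splitOne t with
      | nil => exact absurd hs (splitOne_ne_nil t)
      | cons p ps => simp

theorem mrun_append_one (xs ys : List Char) :
    mrun (xs ++ '1' :: ys) = max (mrun xs) (mrun ys) := by
  unfold mrun
  rw [splitOne_append_one, List.map_append, List.foldl_append, foldl_max_init]

theorem splitOne_replicate (k : Nat) : splitOne (List.replicate k '0') = [List.replicate k '0'] := by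
  induction k with
  | zero => simp [splitOne]
  | succ k ih => simp [List.replicate_succ, splitOne, ih]

theorem mrun_replicate (k : Nat) : mrun (List.replicate k '0') = k := by
  simp [mrun, splitOne_replicate]

theorem trail_le (xs : List Char) (k : Nat) : k ≤ mrun (xs ++ List.replicate k '0') := by
  induction xs with
  | nil => simp [mrun_replicate]
  | cons c t ih => exact le_trans ih (mrun_cons_le c (t ++ List.replicate k '0'))

-- The loop of A computes: max of the incoming maximum and the longest zero-run of
-- (binary of n) followed by `count` zeros already accumulated.
theorem loop_eq (n : Nat) : n ≠ 0 → ∀ (c m : Int), 0 ≤ c → c ≤ m →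
    maxZerosLoop n c m = max m ((mrun (myBin n ++ List.replicate c.toNat '0') : Nat) : Int) := by
  induction n using Nat.strong_induction_on with
  | _ n ih =>
    intro hn c m hc hcm
    rw [maxZerosLoop, dif_neg hn]
    have hpar := Nat.and_one_is_mod n
    rcases Nat.mod_two_eq_zero_or_one n with he | ho
    · -- even bit: count += 1
      have hbit : (n &&& 1 == 0) = true := by simp [hpar, he]
      have hn2 : ¬ n < 2 := by omega
      have hd2 : n / 2 ≠ 0 := by omega
      have hrep : myBin n ++ List.replicate c.toNat '0'
          = myBin (n / 2) ++ List.replicate (c + 1).toNat '0' := by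
        rw [myBin.eq_def]
        simp only [hn2, if_neg, he]
        have : (c + 1).toNat = c.toNat + 1 := by omega
        simp [this, List.replicate_succ, Nat.digitChar]
      simp only [hbit, if_pos, Nat.shiftRight_one]
      rw [ih (n / 2) (Nat.div_lt_self (Nat.pos_of_ne_zero hn) one_lt_two) hd2 (c + 1)
          (max m (c + 1)) (by omega) (le_max_right _ _)]
      rw [hrep]
      have hle : ((c + 1).toNat : Int) ≤ ((mrun (myBin (n / 2) ++ List.replicate (c + 1).toNat '0') : Nat) : Int) :=
        Int.ofNat_le.mpr (trail_le _ _)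
      have hc1 : ((c + 1).toNat : Int) = c + 1 := by omega
      rw [max_assoc]
      congr 1
      omega
    · -- odd bit: count = 0
      have hbit : (n &&& 1 == 0) = false := by simp [hpar, ho]
      have hm0 : max m (0 : Int) = m := by omega
      simp only [hbit, Bool.false_eq_true, if_false, hm0, Nat.shiftRight_one]
      by_cases hd2 : n / 2 = 0
      · -- n = 1
        have h1 : n = 1 := by omega
        subst h1
        rw [maxZerosLoop]
        simp only [Nat.reduceDiv, dif_pos]
        have hb1 : myBin 1 = ['1'] := by rw [myBin]; simp [Nat.digitChar]
        rw [hb1]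
        have : (['1'] ++ List.replicate c.toNat '0') = [] ++ '1' :: List.replicate c.toNat '0' := by simp
        rw [this, mrun_append_one, mrun_replicate]
        have : mrun [] = 0 := by simp [mrun, splitOne]
        rw [this]
        simp only [Nat.zero_max]
        omega
      · rw [ih (n / 2) (Nat.div_lt_self (Nat.pos_of_ne_zero hn) one_lt_two) hd2 0 m le_rfl
            (le_trans hc hcm)]
        have hb : myBin n ++ List.replicate c.toNat '0'
            = myBin (n / 2) ++ '1' :: List.replicate c.toNat '0' := by
          rw [myBin.eq_def]
          have : ¬ n < 2 := by omega
          simp [this, ho, Nat.digitChar]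
        rw [hb, mrun_append_one, mrun_replicate]
        simp only [Int.toNat_zero, List.replicate_zero, List.append_nil]
        rw [Nat.cast_max]
        omega

theorem foldl_max_cast (l : List (List Char)) : ∀ (a : Nat),
    (l.map PySem.List.len).foldl max ((a : Nat) : Int) = (((l.map List.length).foldl max a : Nat) : Int) := by
  induction l with
  | nil => intro a; simp
  | cons x t ih =>
    intro a
    simp only [List.map_cons, List.foldl_cons, PySem.List.len_eq]
    rw [← Nat.cast_max, ih]

-- B's value for n > 0 is mrun of the binary digits.
theorem alt_pos (n : Int) (hn : 0 < n) : max_zeros_alt n = ((mrun (myBin n.toNat) : Nat) : Int) := by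
  unfold max_zeros_alt
  rw [if_neg (by omega)]
  have hcs : (PySem.Int.pyBin n).toList.drop 2 = myBin n.toNat := by
    rw [PySem.Int.toList_pyBin, PySem.Int.toBinChars0b]
    rw [if_neg (by omega)]
    simp [toDigits_eq]
  simp only [hcs, splitOn_one]
  cases hs : splitOne (myBin n.toNat) with
  | nil => exact absurd hs (splitOne_ne_nil _)
  | cons p ps =>
    simp only [hs, List.map_cons, PySem.List.max?_id_cons, PySem.List.len_eq]
    rw [foldl_max_cast]
    unfold mrun
    rw [hs]
    simp only [List.map_cons, List.foldl_cons, Nat.zero_max]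

-- ===== VERDICT (by name: the statement is the Claim_ definition above) =====
theorem max_zeros_spec : Claim_equal_max_zeros := by
  intro n _hdom hpre
  unfold Spec_max_zeros
  rcases eq_or_lt_of_le hpre with h0 | hpos
  · subst h0
    rw [max_zeros, maxZerosLoop]
    simp [max_zeros_alt]
  · rw [max_zeros, loop_eq n.toNat (by omega) 0 0 le_rfl le_rfl, alt_pos n hpos]
    simp
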